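-- pv_equiv track=rewrite | github.com/XthPB/steganography | Runtime_terror.py | gk
-- ===== SOURCE A (Python) =====
-- def gk(s, k):
--     '''this function takes the strings and password and generates a key of length
--     equal to the string'''
--     k = list(k) #list key
--     #if length of password and string is same we return the password
--     if len(s) == len(k):
--         return (k)
--     else: #otherise we need to use a loop and generate a key
--         for i in range(len(s) -
--                        len(k)):
--             k.append(k[i % len(k)])
--     return ("".join(k))
-- ===== SOURCE B (Python) =====
-- def gk(s, k):
--     '''generate a repeating key of the needed length from password k'''
--     L = max(len(s), len(k))
--     reps = -(-L // len(k))          # ceiling division: whole-key repetitions needed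
--     return (k * reps)[:L]
-- ===== Notes on version B (the rewrite author's own statement) =====
-- stated objective: simpler
-- what changed: replaces A's per-character append loop (which indexes the growing list with i % len) by a closed-form ceiling-division count of whole-key repetitions, block replication and one slice
-- outside the precondition, e.g. on gk('ab', 'xy'): A returns ['x', 'y'], B returns 'xy'
import Mathlib
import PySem

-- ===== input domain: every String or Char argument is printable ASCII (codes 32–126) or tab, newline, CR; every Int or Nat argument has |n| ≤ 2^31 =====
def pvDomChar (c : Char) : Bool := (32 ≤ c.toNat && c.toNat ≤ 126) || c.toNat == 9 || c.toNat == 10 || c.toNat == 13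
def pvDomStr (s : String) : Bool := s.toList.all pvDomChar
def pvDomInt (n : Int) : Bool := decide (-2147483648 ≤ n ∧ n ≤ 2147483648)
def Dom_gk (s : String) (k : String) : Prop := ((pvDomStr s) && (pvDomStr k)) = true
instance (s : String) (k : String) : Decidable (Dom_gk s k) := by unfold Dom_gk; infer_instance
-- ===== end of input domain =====

-- B computes the number of whole-key repetitions by ceiling division and takes one slice, instead of A's
-- per-character append loop (simpler; equal cost).

-- ===== PORT A =====
def gk (s : String) (k : String) : String :=
  let kl := k.toList
  if s.toList.length = kl.length then
    String.ofList kl  -- Python returns the LIST list(k) here, not a str; these inputs are outside Pre_gk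
  else
    String.ofList
      ((PySem.List.pyRange 0 ((s.toList.length : Int) - (kl.length : Int))).foldl
        (fun acc i => acc ++ [PySem.List.pyGetD acc (PySem.Int.mod i (acc.length : Int)) ' ']) kl)

-- ===== PORT B =====
def gk_alt (s : String) (k : String) : String :=
  let L : Int := max (s.toList.length : Int) (k.toList.length : Int)
  let reps : Int := -(PySem.Int.floordiv (-L) (k.toList.length : Int))
  String.ofList (PySem.List.slice (List.flatten (List.replicate reps.toNat k.toList)) none (some L))

-- ===== PRECONDITION & SPEC =====
-- Pre_gk excludes (a) equal-length pairs, where A returns a LIST of characters instead of a value of the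
-- declared str type, and (b) empty k with non-empty s, where A raises ZeroDivisionError (B also raises there).
def Pre_gk (s : String) (k : String) : Prop :=
  s.toList.length ≠ k.toList.length ∧ k.toList ≠ []
instance (s : String) (k : String) : Decidable (Pre_gk s k) := by unfold Pre_gk; infer_instance
def pvWitness_gk : String × String := ("hello", "ab")

def Spec_gk (s : String) (k : String) (out : String) : Prop := out = gk_alt s k
instance (s : String) (k : String) (out : String) : Decidable (Spec_gk s k out) := by unfold Spec_gk; infer_instance

-- ===== CLAIM (what is proved, stated in full; the proofs are below) =====
def Claim_equal_gk : Prop := ∀ (s : String) (k : String), Dom_gk s k → Pre_gk s k → Spec_gk s k (gk s k)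

-- ===== LEMMAS AND PROOFS =====

-- the periodic extension of kl to length t: element j is kl[j % len kl]
def pvCyc (kl : List Char) (t : Nat) : List Char :=
  (List.range t).map (fun j => kl.getD (j % kl.length) ' ')

theorem pvCyc_length (kl : List Char) (t : Nat) : (pvCyc kl t).length = t := by
  simp [pvCyc]

theorem pvCyc_len (kl : List Char) : pvCyc kl kl.length = kl := by
  apply List.ext_getElem
  · simp [pvCyc]
  · intro i h1 h2
    simp [pvCyc, Nat.mod_eq_of_lt h2, List.getD_eq_getElem?_getD, List.getElem?_eq_getElem h2]

theorem pvCyc_succ (kl : List Char) (t : Nat) :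
    pvCyc kl (t + 1) = pvCyc kl t ++ [kl.getD (t % kl.length) ' '] := by
  simp [pvCyc, List.range_succ]

theorem pvCyc_add (kl : List Char) (t : Nat) :
    pvCyc kl (kl.length + t) = kl ++ pvCyc kl t := by
  have h := pvCyc_len kl
  simp only [pvCyc, List.range_add, List.map_append, List.map_map] at *
  rw [h]
  congr 1
  apply List.map_congr_left
  intro j _
  simp [Nat.add_mod_left]

theorem pvFlatten_replicate (kl : List Char) (r : Nat) :
    List.flatten (List.replicate r kl) = pvCyc kl (r * kl.length) := by
  induction r with
  | zero => simp [pvCyc]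
  | succ r ih =>
      rw [List.replicate_succ, List.flatten_cons, ih, ← pvCyc_add]
      congr 1
      ring

theorem pvCyc_take (kl : List Char) {t T : Nat} (h : t ≤ T) :
    (pvCyc kl T).take t = pvCyc kl t := by
  simp only [pvCyc, ← List.map_take, List.take_range, Nat.min_eq_left h]

-- A's loop: starting from kl, d appends of acc[i % len(acc)] build the periodic extension to length len kl + d
theorem pvFoldA (kl : List Char) (hm : 0 < kl.length) (d : Nat) :
    (PySem.List.pyRange 0 (d : Int)).foldl
        (fun acc i => acc ++ [PySem.List.pyGetD acc (PySem.Int.mod i (acc.length : Int)) ' ']) kl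
      = pvCyc kl (kl.length + d) := by
  induction d with
  | zero =>
      rw [PySem.List.pyRange_one_eq_nil (by omega)]
      simp [pvCyc_len]
  | succ d ih =>
      have hcast : ((d + 1 : Nat) : Int) = (d : Int) + 1 := by push_cast; ring
      rw [hcast, PySem.List.pyRange_one_succ_right (by positivity), List.foldl_append, ih]
      simp only [List.foldl_cons, List.foldl_nil]
      have hlen : ((pvCyc kl (kl.length + d)).length : Int) = ((kl.length + d : Nat) : Int) := by
        rw [pvCyc_length]
      rw [hlen]
      have hmod : PySem.Int.mod (d : Int) ((kl.length + d : Nat) : Int) = ((d : Nat) : Int) := by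
        rw [PySem.Int.mod_eq_emod_of_pos (by push_cast; omega)]
        apply Int.emod_eq_of_lt <;> push_cast <;> omega
      rw [hmod, PySem.List.pyGetD_natCast]
      have hd : d < kl.length + d := by omega
      rw [show (pvCyc kl (kl.length + d)).getD d ' ' = kl.getD (d % kl.length) ' ' from
        PySem.List.getD_map_range _ _ _ _ hd]
      rw [show kl.length + (d + 1) = (kl.length + d) + 1 from by omega, pvCyc_succ,
        Nat.add_mod_left]

-- ===== VERDICT (by name: the statement is the Claim_ definition above) =====
theorem gk_spec : Claim_equal_gk := by
  intro s k _ hpre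
  obtain ⟨hne, hk⟩ := hpre
  have hm : 0 < k.toList.length := List.length_pos_of_ne_nil hk
  set n := s.toList.length with hn
  set m := k.toList.length with hmdef
  -- B's value is the periodic extension to length max n m
  have hB : gk_alt s k = String.ofList (pvCyc k.toList (max n m)) := by
    unfold gk_alt
    dsimp only
    have hL : max (n : Int) (m : Int) = ((max n m : Nat) : Int) := by
      push_cast; rfl
    set q : Int := -(PySem.Int.floordiv (-(max (n : Int) (m : Int))) (m : Int)) with hq
    have hbr := (PySem.Int.neg_floordiv_neg_eq_iff_of_pos
        (a := max (n : Int) (m : Int)) (b := (m : Int)) (by exact_mod_cast hm)).mp hq.symm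
    obtain ⟨_, h2⟩ := hbr
    have hLpos : 0 < max (n : Int) (m : Int) := lt_of_lt_of_le (by exact_mod_cast hm) (le_max_right _ _)
    have hqpos : 0 < q := by
      by_contra hle
      push_neg at hle
      have : q * (m : Int) ≤ 0 := mul_nonpos_of_nonpos_of_nonneg hle (by positivity)
      omega
    rw [← hn, ← hmdef, PySem.List.slice_to _ (le_of_lt hLpos), pvFlatten_replicate, pvCyc_take]
    · rw [hL, Int.toNat_natCast]
    · have hle : max (n : Int) (m : Int) ≤ q * (m : Int) := h2
      have : (max (n : Int) (m : Int)).toNat ≤ (q * (m : Int)).toNat := Int.toNat_le_toNat hle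
      calc (max (n : Int) (m : Int)).toNat ≤ (q * (m : Int)).toNat := this
        _ = q.toNat * m := by
            rw [Int.toNat_mul (le_of_lt hqpos) (by positivity)]
            simp
  -- A's value is the same periodic extension
  have hA : gk s k = String.ofList (pvCyc k.toList (max n m)) := by
    unfold gk
    dsimp only
    rw [if_neg hne]
    by_cases hcase : n < m
    · rw [PySem.List.pyRange_one_eq_nil (by omega)]
      simp only [List.foldl_nil]
      rw [show max n m = m by omega, hmdef, pvCyc_len]
    · have hlt : m < n := by omega
      have hcast : (n : Int) - (m : Int) = ((n - m : Nat) : Int) := by push_cast; omega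
      rw [hcast, pvFoldA k.toList hm (n - m)]
      congr 2
      omega
  unfold Spec_gk
  rw [hA, hB]
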